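-- pv_equiv track=rewrite | github.com/tofergregg/RosterQuizBackend | cgi-bin/parseNamesStanford.py | photo_positions
-- ===== SOURCE A (Python) =====
-- def photo_positions(line):
--     ''' Determine the location of any "Photo" words on a line.
--         There could be up to four positions, and there will be a range
--         of positions. E.g., at the first and fourth position:
--         "        Photo                                                                         Photo"
--         returns a 4-tuple of true or false values depending on the position
--     '''
--     positions = [False]*4 # start with all falses
--     i = 0 # start of string
--     while i != -1:
--         i = line.find('Photo',i+1) # we shouldn't have a case where it is the first character
--         if i != -1:
--             # assume first location < 15
--             if i < 15:
--                 positions[0] = True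
--             # assume 20 <= second location < 50
--             elif i >= 20 and i < 50:
--                 positions[1] = True
--             # assume 50 <= third location < 70
--             elif i >= 50 and i < 70:
--                 positions[2] = True
--             # assume third position >= 70
--             elif i >= 70:
--                 positions[3] = True
--     return tuple(positions)
-- ===== SOURCE B (Python) =====
-- def photo_positions(line):
--     # An occurrence of 'Photo' (length 5) starts at some index in [a, b)
--     # iff 'Photo' is a substring of line[a:b+4].
--     return ('Photo' in line[1:19],
--             'Photo' in line[20:54],
--             'Photo' in line[50:74],
--             'Photo' in line[70:])
-- ===== Notes on version B (the rewrite author's own statement) =====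
-- stated objective: simpler
-- what changed: A's while/find loop that enumerates every occurrence of the marker word and buckets each start index is replaced by four independent substring-containment tests on overlapping slice windows: the five-character marker starts at an index in [a,b) iff it occurs in line[a:b+4], so the flags are containment tests on line[1:19], line[20:54], line[50:74] and line[70:].
import Mathlib
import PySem

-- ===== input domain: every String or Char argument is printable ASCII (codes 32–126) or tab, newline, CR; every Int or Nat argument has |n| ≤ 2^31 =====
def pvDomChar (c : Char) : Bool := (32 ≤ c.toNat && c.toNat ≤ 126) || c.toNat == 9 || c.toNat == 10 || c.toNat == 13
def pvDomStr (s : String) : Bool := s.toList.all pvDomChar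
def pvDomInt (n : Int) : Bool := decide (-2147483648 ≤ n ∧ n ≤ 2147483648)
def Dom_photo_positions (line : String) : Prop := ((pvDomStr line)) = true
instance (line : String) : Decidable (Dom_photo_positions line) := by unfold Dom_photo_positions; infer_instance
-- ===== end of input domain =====

-- B replaces A's interleaved find-loop-with-bucket-updates by four independent substring
-- tests on overlapping slice windows ('Photo' starts in [a,b) iff it occurs in line[a:b+4])
-- (objective: simpler).

-- ===== PORT A =====
def pvPhoto : List Char := "Photo".toList

-- port of A's while loop: i is always ≥ 0 at the head of an iteration (0 or the last found
-- index), so it is carried as a Nat k; the loop exits when find returns -1. The fuel m only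
-- bounds the recursion depth (each found index is strictly larger, ≤ cs.length, so fuel
-- cs.length + 1 from k = 0 is never exhausted: when fuel would run out, find returns -1 anyway).
def photoLoopA (cs : List Char) : Nat → Nat → Bool × Bool × Bool × Bool →
    Bool × Bool × Bool × Bool
  | 0, _, p => p
  | m + 1, k, p =>
    let j := PySem.Chars.findFrom cs pvPhoto ((k : Int) + 1) none   -- line.find('Photo', i+1)
    if j = -1 then p
    else
      let p' :=
        if j < 15 then (true, p.2.1, p.2.2.1, p.2.2.2)
        else if 20 ≤ j ∧ j < 50 then (p.1, true, p.2.2.1, p.2.2.2)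
        else if 50 ≤ j ∧ j < 70 then (p.1, p.2.1, true, p.2.2.2)
        else if 70 ≤ j then (p.1, p.2.1, p.2.2.1, true)
        else p
      photoLoopA cs m j.toNat p'

def photo_positions (line : String) : Bool × Bool × Bool × Bool :=
  photoLoopA line.toList (line.toList.length + 1) 0 (false, false, false, false)

-- ===== PORT B =====
-- 'Photo' in line[1:19] / [20:54] / [50:74] / [70:]
def photo_positions_alt (line : String) : Bool × Bool × Bool × Bool :=
  (PySem.Str.isIn "Photo" (PySem.Str.slice line (some 1) (some 19)),
   PySem.Str.isIn "Photo" (PySem.Str.slice line (some 20) (some 54)),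
   PySem.Str.isIn "Photo" (PySem.Str.slice line (some 50) (some 74)),
   PySem.Str.isIn "Photo" (PySem.Str.slice line (some 70) none))

-- ===== PRECONDITION & SPEC =====
def Spec_photo_positions (line : String) (out : Bool × Bool × Bool × Bool) : Prop := out = photo_positions_alt line
instance (line : String) (out : Bool × Bool × Bool × Bool) : Decidable (Spec_photo_positions line out) := by unfold Spec_photo_positions; infer_instance

-- ===== CLAIM (what is proved, stated in full; the proofs are below) =====
def Claim_equal_photo_positions : Prop := ∀ (line : String), Dom_photo_positions line → Spec_photo_positions line (photo_positions line)

-- ===== LEMMAS AND PROOFS =====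

-- a find with start index past the end of the string returns -1
theorem pv_findFrom_past (cs sub : List Char) (m : Nat) (h : cs.length < m) :
    PySem.Chars.findFrom cs sub (m : Int) none = -1 := by
  unfold PySem.Chars.findFrom
  have h0 : ¬ ((m : Int) < 0) := by omega
  simp only [h0, if_false]
  rw [if_pos (by omega)]

-- termination helper for A's while loop: a successful find lands strictly past k, within the string
theorem photo_findFrom_bounds (cs : List Char) (k : Nat)
    (h : PySem.Chars.findFrom cs pvPhoto ((k : Int) + 1) none ≠ -1) :
    k + 1 ≤ cs.length ∧ (k : Int) + 1 ≤ PySem.Chars.findFrom cs pvPhoto ((k : Int) + 1) none ∧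
      PySem.Chars.findFrom cs pvPhoto ((k : Int) + 1) none ≤ cs.length := by
  have hcast : ((k : Int) + 1) = ((k + 1 : Nat) : Int) := by push_cast; ring
  by_cases hk : k + 1 ≤ cs.length
  · have heq := PySem.Chars.findFrom_natCast cs pvPhoto (k + 1) hk
    rw [hcast]
    rw [hcast] at h
    rw [heq] at h ⊢
    have hne : PySem.Chars.find (cs.drop (k + 1)) pvPhoto ≠ -1 := by
      intro hc; rw [if_pos hc] at h; exact h rfl
    rw [if_neg hne]
    have hnn : 0 ≤ PySem.Chars.find (cs.drop (k + 1)) pvPhoto := by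
      have := PySem.Chars.neg_one_le_find (cs.drop (k + 1)) pvPhoto
      omega
    have hle : PySem.Chars.find (cs.drop (k + 1)) pvPhoto ≤ (cs.drop (k + 1)).length :=
      PySem.Chars.find_le_length _ _
    rw [List.length_drop] at hle
    refine ⟨hk, by omega, by omega⟩
  · exfalso
    rw [hcast] at h
    exact h (pv_findFrom_past cs pvPhoto (k + 1) (by omega))

-- an occurrence of "Photo" at j needs 5 characters of room
theorem photo_occ_lt (cs : List Char) (j : Nat) (h : pvPhoto <+: cs.drop j) :
    j + 5 ≤ cs.length := by
  have hl := h.length_le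
  have h5 : pvPhoto.length = 5 := by decide
  rw [h5, List.length_drop] at hl
  omega

-- "some occurrence at j > k falls in bucket C", as a Bool
def photoAny (cs : List Char) (k : Nat) (C : Nat → Bool) : Bool :=
  (List.range cs.length).any (fun j => decide (k + 1 ≤ j) && pvPhoto.isPrefixOf (cs.drop j) && C j)

theorem photoAny_iff (cs : List Char) (k : Nat) (C : Nat → Bool) :
    photoAny cs k C = true ↔ ∃ j, k + 1 ≤ j ∧ pvPhoto <+: cs.drop j ∧ C j = true := by
  unfold photoAny
  simp only [List.any_eq_true, List.mem_range, Bool.and_eq_true, decide_eq_true_eq,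
    List.isPrefixOf_iff_prefix]
  constructor
  · rintro ⟨j, _, ⟨h1, h2⟩, h3⟩
    exact ⟨j, h1, h2, h3⟩
  · rintro ⟨j, h1, h2, h3⟩
    exact ⟨j, by have := photo_occ_lt cs j h2; omega, ⟨h1, h2⟩, h3⟩

theorem photoAny_false (cs : List Char) (k : Nat) (C : Nat → Bool)
    (h : ∀ j, k + 1 ≤ j → ¬ pvPhoto <+: cs.drop j) : photoAny cs k C = false := by
  cases hx : photoAny cs k C
  · rfl
  · obtain ⟨j, h1, h2, _⟩ := (photoAny_iff cs k C).mp hx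
    exact absurd h2 (h j h1)

theorem photo_none (cs : List Char) (k : Nat)
    (h : PySem.Chars.findFrom cs pvPhoto ((k : Int) + 1) none = -1) :
    ∀ j, k + 1 ≤ j → ¬ pvPhoto <+: cs.drop j := by
  intro j hj hp
  have hcast : ((k : Int) + 1) = ((k + 1 : Nat) : Int) := by push_cast; ring
  rw [hcast] at h
  by_cases hk : k + 1 ≤ cs.length
  · have hni := (PySem.Chars.findFrom_natCast_eq_neg_one_iff cs pvPhoto (k + 1) hk).mp h
    apply hni
    have hdd : cs.drop j = (cs.drop (k + 1)).drop (j - (k + 1)) := by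
      rw [List.drop_drop]; congr 1; omega
    rw [hdd] at hp
    exact hp.isInfix.trans (List.drop_suffix _ _).isInfix
  · have := photo_occ_lt cs j hp
    omega

theorem photo_some (cs : List Char) (k : Nat)
    (h : PySem.Chars.findFrom cs pvPhoto ((k : Int) + 1) none ≠ -1) :
    pvPhoto <+: cs.drop (PySem.Chars.findFrom cs pvPhoto ((k : Int) + 1) none).toNat ∧
      ∀ i : Nat, k + 1 ≤ i → i < (PySem.Chars.findFrom cs pvPhoto ((k : Int) + 1) none).toNat →
        ¬ pvPhoto <+: cs.drop i := by
  have hb := photo_findFrom_bounds cs k h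
  have hcast : ((k : Int) + 1) = ((k + 1 : Nat) : Int) := by push_cast; ring
  rw [hcast] at h ⊢
  obtain ⟨_, h2, h3⟩ := PySem.Chars.findFrom_natCast_spec cs pvPhoto (k + 1) hb.1 h
  exact ⟨h2, fun i hi1 hi2 => h3 i hi1 hi2⟩

theorem photoAny_split (cs : List Char) (k : Nat) (C : Nat → Bool)
    (h : PySem.Chars.findFrom cs pvPhoto ((k : Int) + 1) none ≠ -1) :
    photoAny cs k C =
      (C (PySem.Chars.findFrom cs pvPhoto ((k : Int) + 1) none).toNat ||
        photoAny cs (PySem.Chars.findFrom cs pvPhoto ((k : Int) + 1) none).toNat C) := by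
  have hb := photo_findFrom_bounds cs k h
  obtain ⟨hocc, hmin⟩ := photo_some cs k h
  set j := PySem.Chars.findFrom cs pvPhoto ((k : Int) + 1) none with hjdef
  rw [Bool.eq_iff_iff]
  simp only [Bool.or_eq_true, photoAny_iff]
  constructor
  · rintro ⟨i, hi1, hi2, hi3⟩
    rcases lt_trichotomy i j.toNat with hlt | heq | hgt
    · exact absurd hi2 (hmin i hi1 hlt)
    · left; rw [← heq]; exact hi3
    · right; exact ⟨i, by omega, hi2, hi3⟩
  · rintro (hC | ⟨i, hi1, hi2, hi3⟩)
    · exact ⟨j.toNat, by omega, hocc, hC⟩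
    · exact ⟨i, by omega, hi2, hi3⟩

theorem photoLoopA_spec (cs : List Char) : ∀ (m k : Nat) (p : Bool × Bool × Bool × Bool),
    cs.length ≤ k + m →
    photoLoopA cs m k p =
      (p.1 || photoAny cs k (fun j => decide (j < 15)),
       p.2.1 || photoAny cs k (fun j => decide (20 ≤ j ∧ j < 50)),
       p.2.2.1 || photoAny cs k (fun j => decide (50 ≤ j ∧ j < 70)),
       p.2.2.2 || photoAny cs k (fun j => decide (70 ≤ j))) := by
  intro m
  induction m with
  | zero =>
    intro k p hk
    have hcast : ((k : Int) + 1) = ((k + 1 : Nat) : Int) := by push_cast; ring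
    have hff : PySem.Chars.findFrom cs pvPhoto ((k : Int) + 1) none = -1 := by
      rw [hcast]; exact pv_findFrom_past cs pvPhoto (k + 1) (by omega)
    have hnone : ∀ j, k + 1 ≤ j → ¬ pvPhoto <+: cs.drop j := photo_none cs k hff
    rw [photoLoopA]
    simp only [photoAny_false cs k _ hnone, Bool.or_false]
  | succ m ih =>
    intro k p hk
    rw [photoLoopA]
    by_cases hj : PySem.Chars.findFrom cs pvPhoto ((k : Int) + 1) none = -1
    · rw [if_pos hj]
      have hnone := photo_none cs k hj
      simp only [photoAny_false cs k _ hnone, Bool.or_false]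
    · rw [if_neg hj]
      have hb := photo_findFrom_bounds cs k hj
      have hs1 := photoAny_split cs k (fun j => decide (j < 15)) hj
      have hs2 := photoAny_split cs k (fun j => decide (20 ≤ j ∧ j < 50)) hj
      have hs3 := photoAny_split cs k (fun j => decide (50 ≤ j ∧ j < 70)) hj
      have hs4 := photoAny_split cs k (fun j => decide (70 ≤ j)) hj
      set j := PySem.Chars.findFrom cs pvPhoto ((k : Int) + 1) none with hjdef
      rw [ih j.toNat _ (by omega), hs1, hs2, hs3, hs4]
      beta_reduce
      have e1 : (decide (j.toNat < 15)) = decide (j < 15) := by rw [decide_eq_decide]; omega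
      have e2 : (decide (20 ≤ j.toNat ∧ j.toNat < 50)) = decide (20 ≤ j ∧ j < 50) := by
        rw [decide_eq_decide]; omega
      have e3 : (decide (50 ≤ j.toNat ∧ j.toNat < 70)) = decide (50 ≤ j ∧ j < 70) := by
        rw [decide_eq_decide]; omega
      have e4 : (decide (70 ≤ j.toNat)) = decide (70 ≤ j) := by rw [decide_eq_decide]; omega
      rw [e1, e2, e3, e4]
      split_ifs with h1 h2 h3 h4
      · rw [decide_eq_true h1, decide_eq_false (show ¬(20 ≤ j ∧ j < 50) by omega),
          decide_eq_false (show ¬(50 ≤ j ∧ j < 70) by omega),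
          decide_eq_false (show ¬(70 ≤ j) by omega)]
        simp
      · rw [decide_eq_false h1, decide_eq_true h2,
          decide_eq_false (show ¬(50 ≤ j ∧ j < 70) by omega),
          decide_eq_false (show ¬(70 ≤ j) by omega)]
        simp
      · rw [decide_eq_false h1, decide_eq_false h2, decide_eq_true h3,
          decide_eq_false (show ¬(70 ≤ j) by omega)]
        simp
      · rw [decide_eq_false h1, decide_eq_false h2, decide_eq_false h3, decide_eq_true h4]
        simp
      · rw [decide_eq_false h1, decide_eq_false h2, decide_eq_false h3, decide_eq_false h4]
        simp

-- "Photo" occurs in the window (cs.drop a).take w  ⟺  it starts at some j with a ≤ j, j+5 ≤ a+w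
theorem photo_isIn_window (cs : List Char) (a w : Nat) :
    PySem.Chars.isIn pvPhoto ((cs.drop a).take w) = true ↔
      ∃ j, a ≤ j ∧ j + 5 ≤ a + w ∧ pvPhoto <+: cs.drop j := by
  rw [← PySem.Chars.exists_prefix_drop_iff_isIn]
  constructor
  · rintro ⟨r, hr⟩
    rw [List.drop_take, List.drop_drop] at hr
    have hlen : pvPhoto.length ≤ w - r := le_trans hr.length_le (by simp)
    have h5 : pvPhoto.length = 5 := by decide
    have hprefix : pvPhoto <+: cs.drop (a + r) := hr.trans (List.take_prefix _ _)
    exact ⟨a + r, by omega, by omega, hprefix⟩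
  · rintro ⟨j, hj1, hj2, hj⟩
    refine ⟨j - a, ?_⟩
    rw [List.drop_take, List.drop_drop]
    have hja : a + (j - a) = j := by omega
    rw [hja]
    rw [List.prefix_take_iff]
    have h5 : pvPhoto.length = 5 := by decide
    refine ⟨hj, ?_⟩
    rw [h5]
    omega

-- same, with no right edge (cs.drop a)
theorem photo_isIn_drop (cs : List Char) (a : Nat) :
    PySem.Chars.isIn pvPhoto (cs.drop a) = true ↔
      ∃ j, a ≤ j ∧ pvPhoto <+: cs.drop j := by
  rw [← PySem.Chars.exists_prefix_drop_iff_isIn]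
  constructor
  · rintro ⟨r, hr⟩
    rw [List.drop_drop] at hr
    exact ⟨a + r, by omega, hr⟩
  · rintro ⟨j, hj1, hj⟩
    refine ⟨j - a, ?_⟩
    rw [List.drop_drop]
    have : a + (j - a) = j := by omega
    rw [this]; exact hj

-- each bucket flag of A equals B's window containment test
theorem photo_bucket_window (cs : List Char) (a b : Nat) (C : Nat → Bool) (ha : 1 ≤ a)
    (hC : ∀ j : Nat, 1 ≤ j → (C j = true ↔ a ≤ j ∧ j < b)) :
    photoAny cs 0 C = PySem.Chars.isIn pvPhoto ((cs.drop a).take (b + 4 - a)) := by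
  rw [Bool.eq_iff_iff, photoAny_iff, photo_isIn_window]
  constructor
  · rintro ⟨j, hj1, hj2, hj3⟩
    obtain ⟨hab, hjb⟩ := (hC j hj1).mp hj3
    exact ⟨j, hab, by omega, hj2⟩
  · rintro ⟨j, hj1, hj2, hj3⟩
    have hblt : j < b := by omega
    exact ⟨j, by omega, hj3, (hC j (by omega)).mpr ⟨hj1, hblt⟩⟩

-- ===== VERDICT (by name: the statement is the Claim_ definition above) =====
theorem photo_positions_spec : Claim_equal_photo_positions := by
  intro line _
  unfold Spec_photo_positions photo_positions photo_positions_alt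
  rw [photoLoopA_spec line.toList (line.toList.length + 1) 0 _ (by omega)]
  simp only [Bool.false_or, PySem.Str.isIn_eq, PySem.Str.toList_slice,
    PySem.Chars.slice_eq_listSlice]
  have hs1 : PySem.List.slice line.toList (some 1) (some 19) =
      (line.toList.drop 1).take 18 := by
    have := PySem.List.slice_natCast line.toList 1 19; exact_mod_cast this
  have hs2 : PySem.List.slice line.toList (some 20) (some 54) =
      (line.toList.drop 20).take 34 := by
    have := PySem.List.slice_natCast line.toList 20 54; exact_mod_cast this
  have hs3 : PySem.List.slice line.toList (some 50) (some 74) =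
      (line.toList.drop 50).take 24 := by
    have := PySem.List.slice_natCast line.toList 50 74; exact_mod_cast this
  have hs4 : PySem.List.slice line.toList (some 70) none = line.toList.drop 70 := by
    have := PySem.List.slice_from_natCast line.toList 70; exact_mod_cast this
  rw [hs1, hs2, hs3, hs4]
  have hb1 := photo_bucket_window line.toList 1 15 (fun j => decide (j < 15)) (by omega)
    (fun j hj => by simp only [decide_eq_true_eq]; try omega)
  have hb2 := photo_bucket_window line.toList 20 50 (fun j => decide (20 ≤ j ∧ j < 50)) (by omega)
    (fun j hj => by simp only [decide_eq_true_eq]; try omega)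
  have hb3 := photo_bucket_window line.toList 50 70 (fun j => decide (50 ≤ j ∧ j < 70)) (by omega)
    (fun j hj => by simp only [decide_eq_true_eq]; try omega)
  have hb4 : photoAny line.toList 0 (fun j => decide (70 ≤ j)) =
      PySem.Chars.isIn pvPhoto (line.toList.drop 70) := by
    rw [Bool.eq_iff_iff, photoAny_iff, photo_isIn_drop]
    constructor
    · rintro ⟨j, hj1, hj2, hj3⟩
      simp only [decide_eq_true_eq] at hj3
      exact ⟨j, hj3, hj2⟩
    · rintro ⟨j, hj1, hj2⟩
      exact ⟨j, by omega, hj2, by simp only [decide_eq_true_eq]; omega⟩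
  have e1 : (15 + 4 - 1 : Nat) = 18 := by omega
  have e2 : (50 + 4 - 20 : Nat) = 34 := by omega
  have e3 : (70 + 4 - 50 : Nat) = 24 := by omega
  rw [e1] at hb1; rw [e2] at hb2; rw [e3] at hb3
  rw [hb1, hb2, hb3, hb4]
  rfl
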